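-- pv_equiv track=rewrite | github.com/myeongjunkim/Algorithm | 백준/Gold/15686. 치킨 배달/치킨 배달.py | solution
-- ===== SOURCE A (Python) =====
-- from collections import deque
-- from itertools import combinations
--
-- def solution(N,M, _map):
--   def get_chicken_points():
--     points = []
--     for r in range(N):
--       for c in range(N):
--         if _map[r][c] == 2:
--           points.append((r,c))
--     return points
--   def get_house_points():
--     points = []
--     for r in range(N):
--       for c in range(N):
--         if _map[r][c] == 1:
--           points.append((r,c))
--     return points
--   def bfs(start):
--     r, c = start
--     d = 0
--     visited = [ [False]*N for _ in range(N) ]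
--     visited[r][c] = True
--
--     q = deque([ (r,c,d) ])
--     while q:
--       r, c, d = q.popleft()
--       for dr, dc in [(1,0), (-1,0), (0,1), (0,-1)]:
--         new_r, new_c = r+dr, c+dc
--         new_d = d+1
--         if not (0<=new_r<N and 0<=new_c<N):
--           continue
--         if visited[new_r][new_c]:
--           continue
--         if _map[new_r][new_c] == 2:
--           return new_d
--         q.append((new_r, new_c, new_d))
--         visited[new_r][new_c] = True
--
--     return -1
--   def get_sum_dist():
--     sum_dist = 0
--     for r in range(N):
--       for c in range(N):
--         if _map[r][c] == 1:
--           sum_dist += bfs((r,c))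
--     return sum_dist
--   def calc_dist(point1, point2):
--     return abs(point1[0]-point2[0]) + abs(point1[1]-point2[1])
--
--   all_dist = []
--   chicken_points = get_chicken_points()
--   house_points = get_house_points()
--   # for case in combinations(chicken_points, len(chicken_points)-M):
--   #   for r, c in case:
--   #     _map[r][c] = 0
--   #   sum_dist = get_sum_dist()
--   #   all_dist.append(sum_dist)
--   #   for r, c in case:
--   #     _map[r][c] = 2
--
--
--
--   for case in combinations(chicken_points, M):
--     sum_dist = 0
--     for house in house_points:
--       dists =  [calc_dist(chicken, house) for chicken in case]
--       sum_dist += min(dists)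
--     all_dist.append(sum_dist)
--
--
--   return min(all_dist)
-- ===== SOURCE B (Python) =====
-- def solution(N, M, _map):
--   # Branch-and-bound-free DFS over "take/skip the next chicken", carrying the
--   # running per-house best distance instead of re-scanning each combination.
--   houses = [(r, c) for r in range(N) for c in range(N) if _map[r][c] == 1]
--   chickens = [(r, c) for r in range(N) for c in range(N) if _map[r][c] == 2]
--
--   def go(chs, k, acc):
--     # acc[i]: best distance from houses[i] to a chicken chosen so far (None = none yet)
--     if k == 0:
--       return sum(a if a is not None else 0 for a in acc)
--     best = None
--     rest = chs
--     while len(rest) >= k: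
--       c = rest[0]
--       rest = rest[1:]
--       dists = [abs(c[0] - h[0]) + abs(c[1] - h[1]) for h in houses]
--       t = go(rest, k - 1, [d if a is None else min(a, d) for a, d in zip(acc, dists)])
--       if t is not None and (best is None or t < best):
--         best = t
--     return best
--
--   return go(chickens, M, [None] * len(houses))
-- ===== Notes on version B (the rewrite author's own statement) =====
-- stated objective: alternative
-- what changed: Replaces itertools.combinations enumeration with per-case rescans (min over all kept chickens for every house, for every combination) by a take/skip DFS over the chicken list that carries an incrementally-updated per-house best-distance vector, so each chosen chicken updates the running minima once instead of every combination being scored from scratch.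
import Mathlib
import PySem

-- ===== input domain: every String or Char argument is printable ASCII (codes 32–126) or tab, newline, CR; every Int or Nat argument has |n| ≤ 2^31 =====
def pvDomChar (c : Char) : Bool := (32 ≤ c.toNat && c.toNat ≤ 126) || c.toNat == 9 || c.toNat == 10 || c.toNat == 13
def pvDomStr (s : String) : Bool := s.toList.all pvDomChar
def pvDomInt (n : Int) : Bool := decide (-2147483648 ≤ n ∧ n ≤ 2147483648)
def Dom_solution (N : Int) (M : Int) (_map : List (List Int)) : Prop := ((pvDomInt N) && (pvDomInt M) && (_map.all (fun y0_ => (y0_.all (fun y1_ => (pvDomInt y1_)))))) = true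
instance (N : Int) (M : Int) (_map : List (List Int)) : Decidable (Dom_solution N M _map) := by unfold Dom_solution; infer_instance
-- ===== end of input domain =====

-- B replaces A's combinations-enumeration (rescoring every kept combination from scratch) by a
-- take/skip DFS over the chicken list carrying a running per-house best-distance vector (objective: alternative).

-- ===== PORT A =====
-- shared grid access: _map[r][c] (indices produced by range(N); out-of-range = IndexError, excluded by Pre_)
def pvCell (_map : List (List Int)) (r c : Int) : Int :=
  PySem.List.pyGetD (PySem.List.pyGetD _map r []) c 0

-- A's get_chicken_points
def chickenPointsA (N : Int) (_map : List (List Int)) : List (Int × Int) :=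
  (PySem.List.pyRange 0 N 1).foldl (fun pts r =>
    (PySem.List.pyRange 0 N 1).foldl (fun pts c =>
      if pvCell _map r c == 2 then pts ++ [(r, c)] else pts) pts) []

-- A's get_house_points
def housePointsA (N : Int) (_map : List (List Int)) : List (Int × Int) :=
  (PySem.List.pyRange 0 N 1).foldl (fun pts r =>
    (PySem.List.pyRange 0 N 1).foldl (fun pts c =>
      if pvCell _map r c == 1 then pts ++ [(r, c)] else pts) pts) []

-- A's calc_dist
def calcDistA (p1 p2 : Int × Int) : Int := |p1.1 - p2.1| + |p1.2 - p2.2|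

-- A's bfs / get_sum_dist belong to a commented-out variant and are never called; they are not ported.
-- itertools.combinations = PySem.List.combinations (for M < 0 Python raises ValueError: outside Pre_).
def solution (N : Int) (M : Int) (_map : List (List Int)) : Int :=
  let chicken_points := chickenPointsA N _map
  let house_points := housePointsA N _map
  let all_dist :=
    (if M < 0 then [] else PySem.List.combinations chicken_points M.toNat).foldl
      (fun all_dist case =>
        let sum_dist := house_points.foldl (fun sum_dist house =>
          sum_dist + (PySem.List.min? (case.map (fun chicken => calcDistA chicken house)) (fun y => y)).getD 0) 0
        all_dist ++ [sum_dist]) []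
  (PySem.List.min? all_dist (fun y => y)).getD 0  -- min([]) raises: outside Pre_

-- ===== PORT B =====
-- B's house/chicken comprehensions
def housePointsB (N : Int) (_map : List (List Int)) : List (Int × Int) :=
  (PySem.List.pyRange 0 N 1).flatMap (fun r =>
    ((PySem.List.pyRange 0 N 1).filter (fun c => pvCell _map r c == 1)).map (fun c => (r, c)))

def chickenPointsB (N : Int) (_map : List (List Int)) : List (Int × Int) :=
  (PySem.List.pyRange 0 N 1).flatMap (fun r =>
    ((PySem.List.pyRange 0 N 1).filter (fun c => pvCell _map r c == 2)).map (fun c => (r, c)))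

-- 'd if a is None else min(a, d)'
def pvOmin (a : Option Int) (d : Int) : Int :=
  match a with
  | none => d
  | some v => min v d

-- '[d if a is None else min(a, d) for a, d in zip(acc, dists)]' with dists the per-house distances to c
def pvMerge (houses : List (Int × Int)) (acc : List (Option Int)) (c : Int × Int) : List (Option Int) :=
  List.zipWith (fun a d => some (pvOmin a d)) acc (houses.map (fun h => |c.1 - h.1| + |c.2 - h.2|))

-- 'sum(a if a is not None else 0 for a in acc)'
def pvLeafSum (acc : List (Option Int)) : Int := (acc.map (fun a => a.getD 0)).sum

-- 'if t is not None and (best is None or t < best): best = t'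
def pvUpd (best t : Option Int) : Option Int :=
  match t with
  | none => best
  | some tv =>
    match best with
    | none => some tv
    | some b => if tv < b then some tv else some b

-- the 'while len(rest) >= k+1' loop of go (g = the recursive call go(·, k, ·))
def pvLoopB (houses : List (Int × Int)) (g : List (Int × Int) → List (Option Int) → Option Int)
    (k : Nat) : List (Int × Int) → List (Option Int) → Option Int → Option Int
  | [], _, best => best
  | c :: rest, acc, best =>
    if rest.length + 1 ≥ k + 1 then
      pvLoopB houses g k rest acc (pvUpd best (g rest (pvMerge houses acc c)))
    else best

-- B's go
def pvGoB (houses : List (Int × Int)) : Nat → List (Int × Int) → List (Option Int) → Option Int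
  | 0, _, acc => some (pvLeafSum acc)
  | k + 1, chs, acc => pvLoopB houses (pvGoB houses k) k chs acc none

def solution_alt (N : Int) (M : Int) (_map : List (List Int)) : Int :=
  let houses := housePointsB N _map
  let chickens := chickenPointsB N _map
  (pvGoB houses M.toNat chickens (houses.map (fun _ => none))).getD 0

-- ===== PRECONDITION & SPEC =====
-- helper for Pre_: number of cells of the N×N prefix holding value v
def pvCnt (N : Int) (_map : List (List Int)) (v : Int) : Nat :=
  ((_map.take N.toNat).map (fun row => ((row.take N.toNat).filter (fun x => x == v)).length)).sum

-- Exactly the inputs on which Python A returns: the N×N prefix exists (else IndexError),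
-- 0 ≤ M ≤ #chickens (else combinations raises / min of an empty all_dist raises), and
-- M ≥ 1 unless there are no houses (else min of an empty dists raises).
def Pre_solution (N : Int) (M : Int) (_map : List (List Int)) : Prop :=
  N.toNat ≤ _map.length ∧ (∀ row ∈ _map.take N.toNat, N.toNat ≤ row.length) ∧
  0 ≤ M ∧ M ≤ (pvCnt N _map 2 : Int) ∧ (1 ≤ M ∨ pvCnt N _map 1 = 0)
instance (N : Int) (M : Int) (_map : List (List Int)) : Decidable (Pre_solution N M _map) := by
  unfold Pre_solution; infer_instance

def pvWitness_solution : Int × Int × List (List Int) := (2, 1, [[1, 0], [0, 2]])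

def Spec_solution (N : Int) (M : Int) (_map : List (List Int)) (out : Int) : Prop := out = solution_alt N M _map
instance (N : Int) (M : Int) (_map : List (List Int)) (out : Int) : Decidable (Spec_solution N M _map out) := by unfold Spec_solution; infer_instance

-- ===== CLAIM (what is proved, stated in full; the proofs are below) =====
def Claim_equal_solution : Prop := ∀ (N : Int) (M : Int) (_map : List (List Int)), Dom_solution N M _map → Pre_solution N M _map → Spec_solution N M _map (solution N M _map)

-- ===== LEMMAS AND PROOFS =====

-- Python's min(xs) (no key) computes the same value as Mathlib's List.min?
theorem pv_min_eq (l : List Int) : PySem.List.min? l (fun y => y) = l.min? := by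
  cases l with
  | nil => simp [pysem]
  | cons x t => rw [PySem.List.min?_id_cons, List.min?_cons']

-- option-valued "min" used to combine branch results
def pvComb (a b : Option Int) : Option Int :=
  match a, b with
  | none, y => y
  | some x, none => some x
  | some x, some y => some (min x y)

theorem pvComb_none_right (a : Option Int) : pvComb a none = a := by
  cases a <;> rfl

theorem pvComb_assoc (a b c : Option Int) : pvComb (pvComb a b) c = pvComb a (pvComb b c) := by
  cases a <;> cases b <;> cases c <;> simp [pvComb, min_assoc]

theorem pv_min?_append (xs ys : List Int) : (xs ++ ys).min? = pvComb xs.min? ys.min? := by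
  cases xs with
  | nil => simp [pvComb]
  | cons x t =>
    rw [List.cons_append, List.min?_cons', List.min?_cons', List.foldl_append]
    cases ys with
    | nil => rfl
    | cons y u =>
      rw [List.min?_cons']
      show some (List.foldl min (min (List.foldl min x t) y) u) = some (min (List.foldl min x t) (List.foldl min y u))
      rw [List.foldl_assoc]

-- accumulating the running minimum inside `some`
theorem pv_foldl_some (t : List (Int × Int)) (f : Int × Int → Int) :
    ∀ v : Int, t.foldl (fun o c => some (pvOmin o (f c))) (some v) =
      some (t.foldl (fun v c => min v (f c)) v) := by
  induction t with
  | nil => intro v; rfl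
  | cons c t ih => intro v; simpa [pvOmin] using ih (min v (f c))

-- merging into an acc that is a pointwise function of the house list
theorem pv_merge_map (hs : List (Int × Int)) (g : Int × Int → Option Int) (c : Int × Int) :
    pvMerge hs (hs.map g) c =
      hs.map (fun h => some (pvOmin (g h) (|c.1 - h.1| + |c.2 - h.2|))) := by
  unfold pvMerge
  rw [List.zipWith_map, List.zipWith_self]

theorem pv_foldl_merge (case : List (Int × Int)) (hs : List (Int × Int)) :
    ∀ g : Int × Int → Option Int,
      case.foldl (pvMerge hs) (hs.map g) =
        hs.map (fun h => case.foldl (fun o c => some (pvOmin o (|c.1 - h.1| + |c.2 - h.2|))) (g h)) := by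
  induction case with
  | nil => intro g; rfl
  | cons c t ih =>
    intro g
    rw [List.foldl_cons, pv_merge_map, ih]
    rfl

-- B's leaf value for a chosen case = A's per-case score
theorem pv_case_eq (hs : List (Int × Int)) (case : List (Int × Int)) :
    pvLeafSum (case.foldl (pvMerge hs) (hs.map (fun _ => none))) =
      hs.foldl (fun s h =>
        s + ((case.map (fun c => calcDistA c h)).min?).getD 0) 0 := by
  rw [pv_foldl_merge]
  unfold pvLeafSum
  rw [List.map_map, PySem.List.foldl_add hs
    (fun h => ((case.map (fun c => calcDistA c h)).min?).getD 0) 0]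
  simp only [Int.zero_add, Function.comp_def]
  congr 1
  apply List.map_congr_left
  intro h _
  cases case with
  | nil => rfl
  | cons c0 t =>
    rw [List.foldl_cons]
    rw [pv_foldl_some t (fun c => |c.1 - h.1| + |c.2 - h.2|)]
    rw [List.map_cons, List.min?_cons', List.foldl_map]
    simp [pvOmin, calcDistA]

-- the while-loop of go: folds the branch minima into `best`
theorem pv_loop_spec (hs : List (Int × Int)) (g : List (Int × Int) → List (Option Int) → Option Int)
    (k : Nat)
    (hg : ∀ rest acc, g rest acc =
      ((PySem.List.combinations rest k).map (fun case => pvLeafSum (case.foldl (pvMerge hs) acc))).min?) :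
    ∀ (rest : List (Int × Int)) (acc : List (Option Int)) (best : Option Int),
      pvLoopB hs g k rest acc best =
        pvComb best (((PySem.List.combinations rest (k + 1)).map
          (fun case => pvLeafSum (case.foldl (pvMerge hs) acc))).min?) := by
  intro rest
  induction rest with
  | nil =>
    intro acc best
    rw [PySem.List.combinations_nil_succ]
    simp [pvLoopB, pvComb_none_right]
  | cons c rest ih =>
    intro acc best
    rw [PySem.List.combinations_cons_succ, List.map_append, pv_min?_append, List.map_map]
    unfold pvLoopB
    by_cases hl : rest.length + 1 ≥ k + 1
    · rw [if_pos hl, ih, hg]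
      have hupd : ∀ (b t : Option Int), pvUpd b t = pvComb b t := by
        intro b t
        cases t <;> cases b <;> simp [pvUpd, pvComb, min_def]
        split <;> simp <;> omega
      have hmap : List.map ((fun case => pvLeafSum (List.foldl (pvMerge hs) acc case)) ∘ fun c1 => c :: c1)
            (PySem.List.combinations rest k) =
          List.map (fun case => pvLeafSum (List.foldl (pvMerge hs) (pvMerge hs acc c) case))
            (PySem.List.combinations rest k) :=
        List.map_congr_left (fun case _ => rfl)
      rw [hupd, pvComb_assoc, hmap]
    · rw [if_neg hl]
      have h1 : rest.length < k := by omega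
      have h2 : rest.length < k + 1 := by omega
      rw [PySem.List.combinations_eq_nil_of_length_lt (xs := rest) h1,
          PySem.List.combinations_eq_nil_of_length_lt (xs := rest) h2]
      simp [pvComb_none_right]

-- go computes the minimum leaf value over all size-k cases
theorem pv_go_spec (hs : List (Int × Int)) (k : Nat) :
    ∀ (chs : List (Int × Int)) (acc : List (Option Int)),
      pvGoB hs k chs acc =
        ((PySem.List.combinations chs k).map (fun case => pvLeafSum (case.foldl (pvMerge hs) acc))).min? := by
  induction k with
  | zero =>
    intro chs acc
    rw [PySem.List.combinations_zero]
    rfl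
  | succ k ih =>
    intro chs acc
    show pvLoopB hs (pvGoB hs k) k chs acc none = _
    rw [pv_loop_spec hs (pvGoB hs k) k ih chs acc none]
    rfl

-- A's grid scans and B's comprehensions produce the same point lists
theorem pv_chicken_eq (N : Int) (_map : List (List Int)) :
    chickenPointsA N _map = chickenPointsB N _map := by
  unfold chickenPointsA chickenPointsB
  simp only [PySem.List.foldl_append_if, PySem.List.foldl_append_eq_flatMap]
  rfl

theorem pv_house_eq (N : Int) (_map : List (List Int)) :
    housePointsA N _map = housePointsB N _map := by
  unfold housePointsA housePointsB
  simp only [PySem.List.foldl_append_if, PySem.List.foldl_append_eq_flatMap]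
  rfl

-- ===== VERDICT (by name: the statement is the Claim_ definition above) =====
theorem solution_spec : Claim_equal_solution := by
  intro N M _map _hdom hpre
  unfold Spec_solution solution solution_alt
  have hM : ¬ M < 0 := not_lt.mpr hpre.2.2.1
  simp only [if_neg hM, PySem.List.foldl_append_singleton_eq_map, List.nil_append,
    pv_chicken_eq, pv_house_eq, pv_min_eq, pv_go_spec]
  congr 2
  apply List.map_congr_left
  intro case _
  exact (pv_case_eq (housePointsB N _map) case).symm
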